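-- pv_equiv track=rewrite | github.com/schummax/MapVis | build/lib/mapvis/utils.py | get_consensus_mapping
-- ===== SOURCE A (Python) =====
-- from typing import Dict, List, Tuple
--
-- def get_consensus_mapping(dataset1_mapping: Dict[str, str],
--                           dataset2_mapping: Dict[str, str]) -> Dict[str, Tuple[List[str], List[str]]]:
--     """
--     Create consensus mapping from two dataset mappings.
--
--     Returns:
--         Dictionary with consensus as key and tuple of (dataset1_labels, dataset2_labels) as value
--     """
--     consensus_map = {}
--
--     # Get all unique consensus labels
--     all_consensus = set(dataset1_mapping.values()) | set(
--         dataset2_mapping.values())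
--
--     for consensus in all_consensus:
--         d1_labels = [k for k, v in dataset1_mapping.items() if v == consensus]
--         d2_labels = [k for k, v in dataset2_mapping.items() if v == consensus]
--         consensus_map[consensus] = (d1_labels, d2_labels)
--
--     return consensus_map
-- ===== SOURCE B (Python) =====
-- from collections import defaultdict
--
-- def get_consensus_mapping(dataset1_mapping, dataset2_mapping):
--     result = defaultdict(lambda: ([], []))
--     for k, v in dataset1_mapping.items():
--         result[v][0].append(k)
--     for k, v in dataset2_mapping.items():
--         result[v][1].append(k)
--     return dict(result)
-- ===== Notes on version B (the rewrite author's own statement) =====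
-- stated objective: faster
-- what changed: Replaced the outer loop over the consensus set with its per-key rescans of both input dicts by two single passes over the inputs that append each label into a defaultdict of list pairs.
import Mathlib
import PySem

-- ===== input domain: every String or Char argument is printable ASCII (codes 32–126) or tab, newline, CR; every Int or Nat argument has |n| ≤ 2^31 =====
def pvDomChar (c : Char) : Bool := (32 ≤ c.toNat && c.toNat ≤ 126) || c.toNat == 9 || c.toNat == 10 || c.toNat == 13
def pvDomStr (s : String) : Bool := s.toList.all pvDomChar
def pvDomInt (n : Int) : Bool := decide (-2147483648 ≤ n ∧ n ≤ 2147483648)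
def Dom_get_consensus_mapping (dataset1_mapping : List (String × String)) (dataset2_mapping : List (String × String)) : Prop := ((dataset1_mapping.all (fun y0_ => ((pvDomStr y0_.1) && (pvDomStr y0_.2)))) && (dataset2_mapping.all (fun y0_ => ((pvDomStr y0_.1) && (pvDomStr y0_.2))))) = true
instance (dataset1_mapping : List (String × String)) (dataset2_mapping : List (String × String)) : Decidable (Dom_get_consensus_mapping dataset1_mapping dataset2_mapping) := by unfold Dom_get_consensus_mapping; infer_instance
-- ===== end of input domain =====

-- B replaces A's loop over the consensus set with its per-key rescans of both inputs by two
-- single accumulation passes over the inputs (objective: faster, one pass per input dict).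


-- ===== PORT A =====
-- Python iterates the set 'all_consensus'; its hash order is not modelled, the Set's
-- first-insertion order is used (dict outputs are compared ignoring order).
def get_consensus_mapping (dataset1_mapping : List (String × String)) (dataset2_mapping : List (String × String)) : List (String × List String × List String) :=
  let all_consensus : PySem.Set String :=
    PySem.Set.union (PySem.Set.ofList (dataset1_mapping.map Prod.snd)) (dataset2_mapping.map Prod.snd)
  let consensus_map : PySem.Dict String (List String × List String) :=
    all_consensus.foldl (fun m consensus =>
      m.insert consensus
        ((dataset1_mapping.filter (fun p => p.2 == consensus)).map Prod.fst,
         (dataset2_mapping.filter (fun p => p.2 == consensus)).map Prod.fst))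
      PySem.Dict.empty
  consensus_map.items

-- ===== PORT B =====
def get_consensus_mapping_alt (dataset1_mapping : List (String × String)) (dataset2_mapping : List (String × String)) : List (String × List String × List String) :=
  let r1 : PySem.Dict String (List String × List String) :=
    dataset1_mapping.foldl (fun m kv => m.modify kv.2 ([], []) (fun lr => (lr.1 ++ [kv.1], lr.2)))
      PySem.Dict.empty
  let r2 : PySem.Dict String (List String × List String) :=
    dataset2_mapping.foldl (fun m kv => m.modify kv.2 ([], []) (fun lr => (lr.1, lr.2 ++ [kv.1]))) r1
  r2.items

-- ===== PRECONDITION & SPEC =====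
def Spec_get_consensus_mapping (dataset1_mapping : List (String × String)) (dataset2_mapping : List (String × String)) (out : List (String × List String × List String)) : Prop := out = get_consensus_mapping_alt dataset1_mapping dataset2_mapping
instance (dataset1_mapping : List (String × String)) (dataset2_mapping : List (String × String)) (out : List (String × List String × List String)) : Decidable (Spec_get_consensus_mapping dataset1_mapping dataset2_mapping out) := by unfold Spec_get_consensus_mapping; infer_instance

-- ===== CLAIM (what is proved, stated in full; the proofs are below) =====
def Claim_equal_get_consensus_mapping : Prop := ∀ (dataset1_mapping : List (String × String)) (dataset2_mapping : List (String × String)), Dom_get_consensus_mapping dataset1_mapping dataset2_mapping → Spec_get_consensus_mapping dataset1_mapping dataset2_mapping (get_consensus_mapping dataset1_mapping dataset2_mapping)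

-- ===== LEMMAS AND PROOFS =====

def keysOf (d : List (String × String)) (c : String) : List String :=
  (d.filter (fun p => p.2 == c)).map Prod.fst

theorem keysOf_eq_nil {d : List (String × String)} {c : String} (h : c ∉ d.map Prod.snd) :
    keysOf d c = [] := by
  simp only [keysOf, List.map_eq_nil_iff, List.filter_eq_nil_iff]
  intro p hp hbeq
  exact h (List.mem_map.2 ⟨p, hp, by simpa using (beq_iff_eq.1 hbeq)⟩)

theorem keysOf_cons (k v : String) (t : List (String × String)) (c : String) :
    keysOf ((k, v) :: t) c = (if v = c then [k] else []) ++ keysOf t c := by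
  simp only [keysOf, List.filter_cons]
  by_cases h : v = c <;> simp [h]

theorem modify_items_mem {V : Type} {D : PySem.Dict String V} {ks : List String} {F : String → V}
    {v : String} (hD : D.items = ks.map (fun c => (c, F c))) (hnd : ks.Nodup) (hv : v ∈ ks)
    (dflt : V) (g : V → V) :
    (D.modify v dflt g).items = ks.map (fun c => (c, if c = v then g (F v) else F c)) := by
  obtain ⟨L⟩ := D
  simp only [] at hD; subst hD
  have hcont : (PySem.Dict.mk (ks.map (fun c => (c, F c)))).contains v = true := by
    simp only [PySem.Dict.contains, List.any_map, List.any_eq_true]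
    exact ⟨v, hv, by simp⟩
  have hfind : (ks.map (fun c => (c, F c))).find? (fun p => p.1 == v) = some (v, F v) := by
    induction ks with
    | nil => simp at hv
    | cons a t ih =>
      rcases List.mem_cons.1 hv with h | h
      · subst h; simp
      · have hav : a ≠ v := fun e => (List.nodup_cons.1 hnd).1 (e ▸ h)
        simp only [List.map_cons, List.find?_cons]
        rw [beq_eq_false_iff_ne.2 hav]
        exact ih (List.nodup_cons.1 hnd).2 h (by
          simp only [PySem.Dict.contains, List.any_map, List.any_eq_true]
          exact ⟨v, h, by simp⟩)
  simp only [PySem.Dict.modify, PySem.Dict.getD, PySem.Dict.get?, hfind,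
    Option.map_some, Option.getD_some, PySem.Dict.insert, hcont, if_pos, List.map_map]
  refine List.map_congr_left (fun c hc => ?_)
  by_cases h : c = v <;> simp [h]

theorem modify_items_not_mem {V : Type} {D : PySem.Dict String V} {ks : List String} {F : String → V}
    {v : String} (hD : D.items = ks.map (fun c => (c, F c))) (hv : v ∉ ks)
    (dflt : V) (g : V → V) :
    (D.modify v dflt g).items = ks.map (fun c => (c, F c)) ++ [(v, g dflt)] := by
  obtain ⟨L⟩ := D
  simp only [] at hD; subst hD
  have hcont : (PySem.Dict.mk (ks.map (fun c => (c, F c)))).contains v = false := by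
    simp only [PySem.Dict.contains, List.any_map, List.any_eq_false]
    intro c hc
    simp only [Function.comp_apply]
    intro e; exact hv (by rw [← beq_iff_eq.1 e]; exact hc)
  have hfind : (ks.map (fun c => (c, F c))).find? (fun p => p.1 == v) = none := by
    rw [List.find?_eq_none]
    intro p hp
    obtain ⟨c, hc, rfl⟩ := List.mem_map.1 hp
    intro e; exact hv (by rw [← beq_iff_eq.1 e]; exact hc)
  simp [PySem.Dict.modify, PySem.Dict.getD, PySem.Dict.get?, PySem.Dict.insert, hcont, hfind]

theorem insert_fold_items {V : Type} (f : String → V) :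
    ∀ (ks : List String) (D : PySem.Dict String V), ks.Nodup →
      (∀ c ∈ ks, D.contains c = false) →
      (ks.foldl (fun m c => m.insert c (f c)) D).items = D.items ++ ks.map (fun c => (c, f c)) := by
  intro ks
  induction ks with
  | nil => intro D _ _; simp
  | cons a t ih =>
    intro D hnd hc
    simp only [List.foldl_cons]
    rw [ih (D.insert a (f a)) (List.nodup_cons.1 hnd).2 (fun c hct => by
      rw [PySem.Dict.contains_insert]
      have : c ≠ a := fun e => (List.nodup_cons.1 hnd).1 (e ▸ hct)
      simp [this, hc c (List.mem_cons_of_mem _ hct)])]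
    have hins : (D.insert a (f a)).items = D.items ++ [(a, f a)] := by
      simp [PySem.Dict.insert, hc a (List.mem_cons_self)]
    rw [hins]
    simp

theorem pass1 :
    ∀ (l : List (String × String)) (ks : List String) (F1 : String → List String), ks.Nodup →
      ∀ (D : PySem.Dict String (List String × List String)),
        D.items = ks.map (fun c => (c, F1 c, ([] : List String))) →
        (l.foldl (fun m kv => m.modify kv.2 ([], []) (fun lr => (lr.1 ++ [kv.1], lr.2))) D).items
          = (PySem.Set.update ks (l.map Prod.snd)).map
              (fun c => (c, (if c ∈ ks then F1 c else []) ++ keysOf l c, ([] : List String))) := by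
  intro l
  induction l with
  | nil =>
    intro ks F1 hnd D hD
    simp only [List.foldl_nil, List.map_nil, PySem.Set.update, hD]
    exact List.map_congr_left fun c hc => by simp [keysOf, hc]
  | cons p t ih =>
    obtain ⟨k, v⟩ := p
    intro ks F1 hnd D hD
    simp only [List.foldl_cons]
    by_cases hv : v ∈ ks
    · have hitems := modify_items_mem (F := fun c => (F1 c, ([] : List String))) hD hnd hv
        ([], []) (fun lr => (lr.1 ++ [k], lr.2))
      have hshape : (D.modify v ([], []) (fun lr => (lr.1 ++ [k], lr.2))).items
          = ks.map (fun c => (c, (if c = v then F1 v ++ [k] else F1 c), ([] : List String))) := by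
        rw [hitems]
        exact List.map_congr_left fun c _ => by by_cases h : c = v <;> simp [h]
      rw [ih ks _ hnd _ hshape]
      have hadd : PySem.Set.add ks v = ks := by
        simp [PySem.Set.add, PySem.Set.contains, hv]
      simp only [List.map_cons, PySem.Set.update, List.foldl_cons, hadd]
      exact List.map_congr_left fun c _ => by
        by_cases hcv : c = v
        · subst hcv
          simp [hv, keysOf_cons]
        · by_cases hck : c ∈ ks <;> simp [hcv, hck, keysOf_cons, Ne.symm hcv]
    · have hitems := modify_items_not_mem (F := fun c => (F1 c, ([] : List String))) hD hv
        ([], []) (fun lr => (lr.1 ++ [k], lr.2))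
      have hshape : (D.modify v ([], []) (fun lr => (lr.1 ++ [k], lr.2))).items
          = (ks ++ [v]).map (fun c => (c, (if c = v then [k] else F1 c), ([] : List String))) := by
        rw [hitems, List.map_append]
        congr 1
        · exact List.map_congr_left fun c hc => by
            have : c ≠ v := fun e => hv (e ▸ hc)
            simp [this]
        · simp
      have hnd' : (ks ++ [v]).Nodup := by
        simp only [List.nodup_append, List.nodup_cons, List.not_mem_nil, not_false_eq_true,
          List.nodup_nil, and_true, true_and, hnd]
        intro a ha b hb
        simp only [List.mem_singleton] at hb
        exact fun e => hv ((hb ▸ e) ▸ ha)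
      rw [ih (ks ++ [v]) _ hnd' _ hshape]
      have hadd : PySem.Set.add ks v = ks ++ [v] := by
        simp [PySem.Set.add, PySem.Set.contains, hv]
      simp only [List.map_cons, PySem.Set.update, List.foldl_cons, hadd]
      exact List.map_congr_left fun c _ => by
        by_cases hcv : c = v
        · subst hcv
          simp [hv, keysOf_cons]
        · by_cases hck : c ∈ ks <;> simp [hcv, hck, keysOf_cons, Ne.symm hcv]

theorem pass2 :
    ∀ (l : List (String × String)) (ks : List String)
      (F1 F2 : String → List String), ks.Nodup →
      ∀ (D : PySem.Dict String (List String × List String)),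
        D.items = ks.map (fun c => (c, F1 c, F2 c)) →
        (l.foldl (fun m kv => m.modify kv.2 ([], []) (fun lr => (lr.1, lr.2 ++ [kv.1]))) D).items
          = (PySem.Set.update ks (l.map Prod.snd)).map
              (fun c => (c, (if c ∈ ks then F1 c else []),
                            (if c ∈ ks then F2 c else []) ++ keysOf l c)) := by
  intro l
  induction l with
  | nil =>
    intro ks F1 F2 hnd D hD
    simp only [List.foldl_nil, List.map_nil, PySem.Set.update, hD]
    exact List.map_congr_left fun c hc => by simp [keysOf, hc]
  | cons p t ih =>
    obtain ⟨k, v⟩ := p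
    intro ks F1 F2 hnd D hD
    simp only [List.foldl_cons]
    by_cases hv : v ∈ ks
    · have hitems := modify_items_mem (F := fun c => (F1 c, F2 c)) hD hnd hv
        ([], []) (fun lr => (lr.1, lr.2 ++ [k]))
      have hshape : (D.modify v ([], []) (fun lr => (lr.1, lr.2 ++ [k]))).items
          = ks.map (fun c => (c, F1 c, (if c = v then F2 v ++ [k] else F2 c))) := by
        rw [hitems]
        exact List.map_congr_left fun c _ => by by_cases h : c = v <;> simp [h]
      rw [ih ks _ _ hnd _ hshape]
      have hadd : PySem.Set.add ks v = ks := by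
        simp [PySem.Set.add, PySem.Set.contains, hv]
      simp only [List.map_cons, PySem.Set.update, List.foldl_cons, hadd]
      exact List.map_congr_left fun c _ => by
        by_cases hcv : c = v
        · subst hcv
          simp [hv, keysOf_cons]
        · by_cases hck : c ∈ ks <;> simp [hcv, hck, keysOf_cons, Ne.symm hcv]
    · have hitems := modify_items_not_mem (F := fun c => (F1 c, F2 c)) hD hv
        ([], []) (fun lr => (lr.1, lr.2 ++ [k]))
      have hshape : (D.modify v ([], []) (fun lr => (lr.1, lr.2 ++ [k]))).items
          = (ks ++ [v]).map (fun c => (c, (if c = v then [] else F1 c),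
              (if c = v then [k] else F2 c))) := by
        rw [hitems, List.map_append]
        congr 1
        · exact List.map_congr_left fun c hc => by
            have : c ≠ v := fun e => hv (e ▸ hc)
            simp [this]
        · simp
      have hnd' : (ks ++ [v]).Nodup := by
        simp only [List.nodup_append, List.nodup_cons, List.not_mem_nil, not_false_eq_true,
          List.nodup_nil, and_true, true_and, hnd]
        intro a ha b hb
        simp only [List.mem_singleton] at hb
        exact fun e => hv ((hb ▸ e) ▸ ha)
      rw [ih (ks ++ [v]) _ _ hnd' _ hshape]
      have hadd : PySem.Set.add ks v = ks ++ [v] := by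
        simp [PySem.Set.add, PySem.Set.contains, hv]
      simp only [List.map_cons, PySem.Set.update, List.foldl_cons, hadd]
      exact List.map_congr_left fun c _ => by
        by_cases hcv : c = v
        · subst hcv
          simp [hv, keysOf_cons]
        · by_cases hck : c ∈ ks <;> simp [hcv, hck, keysOf_cons, Ne.symm hcv]

-- ===== VERDICT (by name: the statement is the Claim_ definition above) =====
theorem get_consensus_mapping_spec : Claim_equal_get_consensus_mapping := by
  intro d1 d2 _
  unfold Spec_get_consensus_mapping get_consensus_mapping get_consensus_mapping_alt
  have hnd1 : (PySem.Set.ofList (d1.map Prod.snd)).Nodup := PySem.Set.nodup_ofList _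
  have hndA : (PySem.Set.union (PySem.Set.ofList (d1.map Prod.snd)) (d2.map Prod.snd)).Nodup :=
    PySem.Set.nodup_update _ _ hnd1
  rw [insert_fold_items
    (fun c => ((d1.filter (fun p => p.2 == c)).map Prod.fst,
               (d2.filter (fun p => p.2 == c)).map Prod.fst))
    (PySem.Set.union (PySem.Set.ofList (d1.map Prod.snd)) (d2.map Prod.snd))
    PySem.Dict.empty hndA (fun c _ => PySem.Dict.contains_empty c)]
  have h1 := pass1 d1 [] (fun _ => []) List.nodup_nil PySem.Dict.empty (by simp [PySem.Dict.empty])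
  have h1' : (d1.foldl (fun m kv => m.modify kv.2 ([], []) (fun lr => (lr.1 ++ [kv.1], lr.2)))
      PySem.Dict.empty).items
      = (PySem.Set.ofList (d1.map Prod.snd)).map (fun c => (c, keysOf d1 c, ([] : List String))) := by
    rw [h1]
    exact List.map_congr_left fun c _ => by simp
  have h2 := pass2 d2 (PySem.Set.ofList (d1.map Prod.snd)) (keysOf d1) (fun _ => []) hnd1
    (d1.foldl (fun m kv => m.modify kv.2 ([], []) (fun lr => (lr.1 ++ [kv.1], lr.2)))
      PySem.Dict.empty) h1'
  rw [h2]
  refine List.map_congr_left fun c _ => ?_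
  by_cases hc : c ∈ PySem.Set.ofList (d1.map Prod.snd)
  · simp [hc, keysOf]
  · have : c ∉ d1.map Prod.snd := fun h => hc ((PySem.Set.mem_ofList _ _).2 h)
    have h0 : (d1.filter (fun p => p.2 == c)).map Prod.fst = [] := keysOf_eq_nil this
    simp [hc, h0, keysOf]
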